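-- pv_equiv track=rewrite | github.com/dlebed/secure-constants | bounds_calculator.py | hamming_bound
-- ===== SOURCE A (Python) =====
-- import math
--
-- def hamming_sphere_volume(n: int, r: int) -> int:
--     """Calculate volume of Hamming sphere: V(n,r) = Σ(i=0 to r) C(n,i)"""
--     if r > n:
--         return 2 ** n
--     return sum(math.comb(n, i) for i in range(r + 1))
--
-- def hamming_bound(n: int, M: int) -> int:
--     """Hamming (sphere-packing) bound: M · V(n, ⌊(d-1)/2⌋) ≤ 2ⁿ"""
--     if M <= 1:
--         return n
--     max_total = 2 ** n
--     for d in range(n, 0, -1):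
--         t = (d - 1) // 2
--         if M * hamming_sphere_volume(n, t) <= max_total:
--             return d
--     return 1
-- ===== SOURCE B (Python) =====
-- def hamming_bound(n, M):
--     if M <= 1:
--         return n
--     if n < 1:
--         return 1
--     total = 1 << n
--
--     def vol(t):
--         # V(n,t) = sum_{i=0..t} C(n,i), built incrementally via Pascal's ratio
--         s, c = 0, 1
--         for i in range(t + 1):
--             s += c
--             c = c * (n - i) // (i + 1)
--         return s
--
--     def cond(d):
--         return M * vol((d - 1) // 2) <= total
--
--     if cond(n):
--         return n
--     if M > total:  # even d = 1 fails (vol(0) = 1)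
--         return 1
--     # invariant: cond(lo) holds, cond(hi) fails, 1 <= lo < hi <= n
--     lo, hi = 1, n
--     while hi - lo > 1:
--         mid = (lo + hi) // 2
--         if cond(mid):
--             lo = mid
--         else:
--             hi = mid
--     return lo
-- ===== Notes on version B (the rewrite author's own statement) =====
-- stated objective: faster
-- what changed: Replaces the linear downward scan over d (each step recomputing the sphere volume from scratch with math.comb) by a binary search over d exploiting that the sphere-packing condition is antitone in d, with the volume computed incrementally via Pascal's ratio.
import Mathlib
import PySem

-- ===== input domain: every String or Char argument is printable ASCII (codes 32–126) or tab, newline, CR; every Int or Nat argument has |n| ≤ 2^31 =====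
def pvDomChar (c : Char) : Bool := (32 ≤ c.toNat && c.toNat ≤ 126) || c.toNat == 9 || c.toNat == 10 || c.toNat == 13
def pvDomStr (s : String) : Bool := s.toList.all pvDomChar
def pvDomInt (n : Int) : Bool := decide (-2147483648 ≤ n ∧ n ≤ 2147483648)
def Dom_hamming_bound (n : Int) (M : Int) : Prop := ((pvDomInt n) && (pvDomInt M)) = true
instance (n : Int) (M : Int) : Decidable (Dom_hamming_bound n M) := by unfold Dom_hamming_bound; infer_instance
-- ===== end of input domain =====

-- B replaces A's linear downward scan over d (each step recomputing the sphere volume from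
-- scratch via math.comb) by a binary search over d using the antitonicity of the packing
-- condition, with the volume built incrementally via Pascal's ratio (objective: faster).

-- ===== PORT A =====
-- math.comb(n, i) is ported as Nat.choose on .toNat; A only reaches it with 0 ≤ i ≤ n
-- (the d-loop is empty for n ≤ 0), where this is exact.
def hamming_sphere_volume (n : Int) (r : Int) : Int :=
  if r > n then 2 ^ n.toNat
  else ((PySem.List.pyRange 0 (r + 1) 1).map (fun i => (n.toNat.choose i.toNat : Int))).sum

-- the 'for d in range(n, 0, -1): if …: return d' loop with its early return; falls through
-- to 1. (Python's 2**n for n < 0 is a float but is never used there — the loop is empty;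
-- the port's 2 ^ n.toNat is likewise unused in that case.)
def pvLoopA (n M max_total : Int) (d : Int) : Int :=
  if 0 < d then
    if M * hamming_sphere_volume n (PySem.Int.floordiv (d - 1) 2) ≤ max_total then d
    else pvLoopA n M max_total (d - 1)
  else 1
termination_by d.toNat
decreasing_by omega

def hamming_bound (n : Int) (M : Int) : Int :=
  if M ≤ 1 then n
  else pvLoopA n M (2 ^ n.toNat) n

-- ===== PORT B =====
-- Source B's vol(t): s, c accumulated over i in range(t + 1), with c = c * (n - i) // (i + 1)
def pvVol (n t : Int) : Int :=
  ((PySem.List.pyRange 0 (t + 1) 1).foldl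
    (fun (sc : Int × Int) i => (sc.1 + sc.2, PySem.Int.floordiv (sc.2 * (n - i)) (i + 1)))
    (0, 1)).1

-- Source B's cond(d)
def pvCond (n M total d : Int) : Bool :=
  M * pvVol n (PySem.Int.floordiv (d - 1) 2) ≤ total

-- Source B's while-loop: invariant cond(lo) ∧ ¬cond(hi); shrink [lo, hi] by bisection
def pvSearch (n M total lo hi : Int) : Int :=
  if 1 < hi - lo then
    if pvCond n M total (PySem.Int.floordiv (lo + hi) 2) then
      pvSearch n M total (PySem.Int.floordiv (lo + hi) 2) hi
    else
      pvSearch n M total lo (PySem.Int.floordiv (lo + hi) 2)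
  else lo
termination_by (hi - lo).toNat
decreasing_by
  all_goals
    have h2 : PySem.Int.floordiv (lo + hi) 2 = (lo + hi) / 2 :=
      PySem.Int.floordiv_eq_ediv_of_pos (by omega)
    rw [h2] at *
    omega

def hamming_bound_alt (n : Int) (M : Int) : Int :=
  if M ≤ 1 then n
  else if n < 1 then 1
  else
    let total : Int := 2 ^ n.toNat
    if pvCond n M total n then n
    else if total < M then 1
    else pvSearch n M total 1 n

-- ===== PRECONDITION & SPEC =====
def Spec_hamming_bound (n : Int) (M : Int) (out : Int) : Prop := out = hamming_bound_alt n M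
instance (n : Int) (M : Int) (out : Int) : Decidable (Spec_hamming_bound n M out) := by unfold Spec_hamming_bound; infer_instance

-- ===== CLAIM (what is proved, stated in full; the proofs are below) =====
def Claim_equal_hamming_bound : Prop := ∀ (n : Int) (M : Int), Dom_hamming_bound n M → Spec_hamming_bound n M (hamming_bound n M)

-- ===== LEMMAS AND PROOFS =====

-- the packing condition, phrased through A's volume function
def pvCA (n M total d : Int) : Prop :=
  M * hamming_sphere_volume n (PySem.Int.floordiv (d - 1) 2) ≤ total

theorem list_sum_range (m : Nat) (f : Nat → Int) :
    ((List.range m).map f).sum = ∑ j ∈ Finset.range m, f j := by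
  induction m with
  | zero => simp
  | succ m ih => rw [List.range_succ, List.map_append, List.sum_append, ih, Finset.sum_range_succ]; simp

theorem hsv_eq (n t : Int) (h1 : 0 ≤ t) (h2 : t ≤ n) :
    hamming_sphere_volume n t = ∑ j ∈ Finset.range (t.toNat + 1), (n.toNat.choose j : Int) := by
  unfold hamming_sphere_volume
  rw [if_neg (by omega), PySem.List.pyRange_one]
  have h3 : (t + 1 - 0).toNat = t.toNat + 1 := by omega
  rw [h3, List.map_map, list_sum_range]
  apply Finset.sum_congr rfl
  intro k _
  simp

-- loop invariant of Source B's vol: after i = 0 … k-1 the state is (Σ_{j<k} C(n,j), C(n,k))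
theorem pvVol_inv (n : Int) (hn : 1 ≤ n) :
    ∀ (k : Nat), k ≤ n.toNat →
      (List.range k).foldl (fun (sc : Int × Int) (j : Nat) =>
          (sc.1 + sc.2, PySem.Int.floordiv (sc.2 * (n - (0 + (j:Int)))) ((0 + (j:Int)) + 1))) (0, 1)
        = (∑ j ∈ Finset.range k, (n.toNat.choose j : Int), (n.toNat.choose k : Int)) := by
  intro k
  induction k with
  | zero => simp
  | succ k ih =>
    intro hk
    rw [List.range_succ, List.foldl_append, ih (by omega)]
    simp only [List.foldl]
    have hcast : n - (0 + (k:Int)) = ((n.toNat - k : Nat) : Int) := by omega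
    have key : (n.toNat.choose k : Int) * (n - (0 + (k:Int))) = ((n.toNat.choose (k+1) * (k+1) : Nat) : Int) := by
      rw [hcast, Nat.choose_succ_right_eq]
      push_cast
      ring
    have hdcast : (0 + (k:Int)) + 1 = ((k + 1 : Nat) : Int) := by push_cast; ring
    rw [Prod.ext_iff]
    constructor
    · simp [Finset.sum_range_succ]
    · simp only []
      rw [key, hdcast, PySem.Int.floordiv_natCast, Nat.mul_div_cancel _ (by omega)]

theorem vol_eq (n t : Int) (hn : 1 ≤ n) (h1 : 0 ≤ t) (h2 : t < n) :
    pvVol n t = hamming_sphere_volume n t := by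
  unfold pvVol
  rw [PySem.List.pyRange_one, List.foldl_map]
  have h3 : (t + 1 - 0).toNat = t.toNat + 1 := by omega
  rw [h3, pvVol_inv n hn (t.toNat + 1) (by omega), hsv_eq n t h1 (by omega)]

theorem t_bounds (n d : Int) (hn : 1 ≤ n) (hd : 1 ≤ d) (hdn : d ≤ n) :
    0 ≤ PySem.Int.floordiv (d - 1) 2 ∧ PySem.Int.floordiv (d - 1) 2 < n := by
  rw [PySem.Int.floordiv_eq_ediv_of_pos (by omega : (0:Int) < 2)]
  omega

theorem CA_antitone (n M total d d' : Int) (hn : 1 ≤ n) (hM : 0 ≤ M)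
    (hd : 1 ≤ d) (hdd : d ≤ d') (hd' : d' ≤ n) (h : pvCA n M total d') :
    pvCA n M total d := by
  have e1 : PySem.Int.floordiv (d - 1) 2 = (d - 1) / 2 := PySem.Int.floordiv_eq_ediv_of_pos (by omega)
  have e2 : PySem.Int.floordiv (d' - 1) 2 = (d' - 1) / 2 := PySem.Int.floordiv_eq_ediv_of_pos (by omega)
  unfold pvCA at h ⊢
  rw [e1] at ⊢
  rw [e2] at h
  have hv : hamming_sphere_volume n ((d - 1) / 2) ≤ hamming_sphere_volume n ((d' - 1) / 2) := by
    have g1 : (0:Int) ≤ (d - 1) / 2 := by omega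
    have g2 : (d - 1) / 2 ≤ n := by omega
    have g3 : (0:Int) ≤ (d' - 1) / 2 := by omega
    have g4 : (d' - 1) / 2 ≤ n := by omega
    rw [hsv_eq n ((d - 1) / 2) g1 g2, hsv_eq n ((d' - 1) / 2) g3 g4]
    apply Finset.sum_le_sum_of_subset_of_nonneg
    · have hle : (d - 1) / 2 ≤ (d' - 1) / 2 := by omega
      intro x hx
      simp only [Finset.mem_range] at *
      omega
    · intro j _ _; positivity
  calc M * hamming_sphere_volume n ((d - 1) / 2)
      ≤ M * hamming_sphere_volume n ((d' - 1) / 2) := mul_le_mul_of_nonneg_left hv hM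
    _ ≤ total := h

theorem cond_iff (n M total d : Int) (hn : 1 ≤ n) (hd : 1 ≤ d) (hdn : d ≤ n) :
    pvCond n M total d = true ↔ pvCA n M total d := by
  obtain ⟨hb1, hb2⟩ := t_bounds n d hn hd hdn
  unfold pvCond pvCA
  rw [vol_eq n (PySem.Int.floordiv (d - 1) 2) hn hb1 hb2]
  exact decide_eq_true_iff

-- characterisation of A's scan: its result r is ≥ 1, ≤ d (or the fallback 1), satisfies the
-- packing condition (or is the fallback 1), and nothing above it up to d satisfies it
theorem loopA_fuel (n M T : Int) : ∀ (k : Nat) (d : Int), d.toNat ≤ k →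
    1 ≤ pvLoopA n M T d ∧ (pvLoopA n M T d ≤ d ∨ pvLoopA n M T d = 1) ∧
    (pvCA n M T (pvLoopA n M T d) ∨ pvLoopA n M T d = 1) ∧
    (∀ e, pvLoopA n M T d < e → e ≤ d → ¬ pvCA n M T e) := by
  intro k
  induction k with
  | zero =>
    intro d hk
    rw [pvLoopA]
    rw [if_neg (by omega)]
    exact ⟨by omega, Or.inr rfl, Or.inr rfl, fun e he1 he2 => by omega⟩
  | succ k ih =>
    intro d hk
    rw [pvLoopA]
    by_cases hpos : 0 < d
    · rw [if_pos hpos]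
      by_cases hc : M * hamming_sphere_volume n (PySem.Int.floordiv (d - 1) 2) ≤ T
      · rw [if_pos hc]
        exact ⟨by omega, Or.inl le_rfl, Or.inl hc, fun e he1 he2 => by omega⟩
      · rw [if_neg hc]
        obtain ⟨ih1, ih2, ih3, ih4⟩ := ih (d - 1) (by omega)
        refine ⟨ih1, by omega, ih3, fun e he1 he2 => ?_⟩
        by_cases hed : e = d
        · subst hed; exact hc
        · exact ih4 e he1 (by omega)
    · rw [if_neg hpos]
      exact ⟨by omega, Or.inr rfl, Or.inr rfl, fun e he1 he2 => by omega⟩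

-- characterisation of B's bisection: from cond(lo) ∧ ¬cond(hi) it returns the r with
-- cond(r) ∧ ¬cond(r+1)
theorem search_fuel (n M T : Int) (hn : 1 ≤ n) :
    ∀ (k : Nat) (lo hi : Int), (hi - lo).toNat ≤ k → 1 ≤ lo → lo < hi → hi ≤ n →
      pvCA n M T lo → ¬ pvCA n M T hi →
      lo ≤ pvSearch n M T lo hi ∧ pvSearch n M T lo hi < hi ∧
      pvCA n M T (pvSearch n M T lo hi) ∧ ¬ pvCA n M T (pvSearch n M T lo hi + 1) := by
  intro k
  induction k with
  | zero => intro lo hi hk; omega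
  | succ k ih =>
    intro lo hi hk h1 h2 h3 hclo hchi
    rw [pvSearch]
    by_cases hgap : 1 < hi - lo
    · rw [if_pos hgap]
      have hmid : PySem.Int.floordiv (lo + hi) 2 = (lo + hi) / 2 :=
        PySem.Int.floordiv_eq_ediv_of_pos (by omega)
      have hmb1 : lo < PySem.Int.floordiv (lo + hi) 2 := by rw [hmid]; omega
      have hmb2 : PySem.Int.floordiv (lo + hi) 2 < hi := by rw [hmid]; omega
      by_cases hc : pvCond n M T (PySem.Int.floordiv (lo + hi) 2) = true
      · rw [if_pos hc]
        have hca : pvCA n M T (PySem.Int.floordiv (lo + hi) 2) :=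
          (cond_iff n M T _ hn (by omega) (by omega)).1 hc
        exact (ih _ hi (by omega) (by omega) (by omega) h3 hca hchi).imp
          (fun a => by omega) (fun a => a)
      · rw [if_neg hc]
        have hca : ¬ pvCA n M T (PySem.Int.floordiv (lo + hi) 2) := by
          intro hx
          exact hc ((cond_iff n M T _ hn (by omega) (by omega)).2 hx)
        have := ih lo _ (by omega) h1 (by omega) (by omega) hclo hca
        exact ⟨this.1, by omega, this.2.2⟩
    · rw [if_neg hgap]
      have : hi = lo + 1 := by omega
      exact ⟨le_rfl, by omega, hclo, by rw [← this]; exact hchi⟩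

theorem CA_one_iff (n M T : Int) (hn : 1 ≤ n) : pvCA n M T 1 ↔ M ≤ T := by
  unfold pvCA
  have h0 : PySem.Int.floordiv ((1:Int) - 1) 2 = 0 := by
    rw [PySem.Int.floordiv_eq_ediv_of_pos (by omega)]; norm_num
  rw [h0, hsv_eq n 0 le_rfl (by omega)]
  simp

theorem main (n : Int) (M : Int) : hamming_bound n M = hamming_bound_alt n M := by
  unfold hamming_bound hamming_bound_alt
  by_cases hM : M ≤ 1
  · rw [if_pos hM, if_pos hM]
  · rw [if_neg hM, if_neg hM]
    by_cases hn : n < 1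
    · rw [if_pos hn, pvLoopA, if_neg (by omega)]
    · rw [if_neg hn]
      simp only []
      set T : Int := 2 ^ n.toNat with hT
      have hn1 : 1 ≤ n := by omega
      have hM0 : 0 ≤ M := by omega
      obtain ⟨l1, l2, l3, l4⟩ := loopA_fuel n M T n.toNat n (le_refl _)
      set r : Int := pvLoopA n M T n with hr
      by_cases hc : pvCond n M T n = true
      · rw [if_pos hc]
        have hca : pvCA n M T n := (cond_iff n M T n hn1 hn1 le_rfl).1 hc
        rw [hr, pvLoopA, if_pos (show (0:Int) < n by omega)]
        exact if_pos hca
      · rw [if_neg hc]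
        have hcan : ¬ pvCA n M T n := fun hx => hc ((cond_iff n M T n hn1 hn1 le_rfl).2 hx)
        by_cases hTM : T < M
        · rw [if_pos hTM]
          rcases l3 with hca | h1
          · exfalso
            have hrn : r ≤ n := by rcases l2 with h | h <;> omega
            have : pvCA n M T 1 := CA_antitone n M T 1 r hn1 hM0 le_rfl l1 hrn hca
            have := (CA_one_iff n M T hn1).1 this
            omega
          · exact h1
        · rw [if_neg hTM]
          have hca1 : pvCA n M T 1 := (CA_one_iff n M T hn1).2 (by omega)
          have h1n : 1 < n := by
            rcases eq_or_lt_of_le hn1 with h | h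
            · exact absurd (h ▸ hca1) hcan
            · exact h
          obtain ⟨s1, s2, s3, s4⟩ :=
            search_fuel n M T hn1 (n - 1).toNat 1 n (by omega) le_rfl h1n le_rfl hca1 hcan
          set r' : Int := pvSearch n M T 1 n with hr'
          have hler : r' ≤ r := by
            by_contra hlt
            exact l4 r' (by omega) (by omega) s3
          have hrle : r ≤ r' := by
            rcases l3 with hca | h1
            · by_contra hlt
              have hrn : r ≤ n := by rcases l2 with h | h <;> omega
              exact s4 (CA_antitone n M T (r' + 1) r hn1 hM0 (by omega) (by omega) hrn hca)
            · omega
          omega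

-- ===== VERDICT (by name: the statement is the Claim_ definition above) =====
theorem hamming_bound_spec : Claim_equal_hamming_bound := by
  intro n M _
  exact main n M
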